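-- pv_equiv track=rewrite | github.com/Somesh-Salunkhe/Master_Thesis | Weak_Labeling_Using_XCLIP/src/xclip_har/visualization/timeline.py | labels_to_intervals
-- ===== SOURCE A (Python) =====
-- from typing import List, Tuple
--
-- def labels_to_intervals(labels: List[str]) -> List[Tuple[int, int, str]]:
--     """Converts a sequence of labels into intervals (start, end, label)."""
--     if not labels:
--         return []
--
--     intervals = []
--     start = 0
--     current_label = labels[0]
--
--     for i in range(1, len(labels)):
--         if labels[i] != current_label:
--             intervals.append((start, i, current_label))
--             start = i
--             current_label = labels[i]
--
--     intervals.append((start, len(labels), current_label))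
--     return intervals
-- ===== SOURCE B (Python) =====
-- def labels_to_intervals(labels):
--     """Converts a sequence of labels into intervals (start, end, label)."""
--     if not labels:
--         return []
--     n = len(labels)
--     boundaries = [0] + [i for i in range(1, n) if labels[i] != labels[i - 1]] + [n]
--     return [(s, e, labels[s]) for s, e in zip(boundaries, boundaries[1:])]
-- ===== Notes on version B (the rewrite author's own statement) =====
-- stated objective: alternative
-- what changed: B first builds the explicit table of run boundaries (positions where the label changes, plus 0 and n) and then emits intervals by pairing adjacent boundaries, instead of A's single stateful scan carrying (start, current_label) and flushing on change.
import Mathlib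
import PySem

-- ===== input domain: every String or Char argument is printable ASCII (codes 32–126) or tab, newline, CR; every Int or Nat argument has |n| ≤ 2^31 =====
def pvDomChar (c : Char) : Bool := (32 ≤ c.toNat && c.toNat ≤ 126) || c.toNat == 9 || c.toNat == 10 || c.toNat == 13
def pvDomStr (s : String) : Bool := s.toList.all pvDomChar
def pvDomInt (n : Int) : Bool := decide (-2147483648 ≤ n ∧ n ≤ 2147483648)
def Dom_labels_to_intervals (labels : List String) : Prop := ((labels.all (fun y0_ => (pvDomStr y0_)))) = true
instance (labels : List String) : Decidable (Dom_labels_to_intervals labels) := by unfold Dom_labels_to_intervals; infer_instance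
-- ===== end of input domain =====

-- B replaces A's stateful scan (carrying start/current_label) by an explicit boundary table
-- paired into intervals; objective: alternative decomposition, same O(n) cost.

-- ===== PORT A =====
def labels_to_intervals (labels : List String) : List (Int × Int × String) :=
  if labels.length = 0 then []
  else
    let fin := (PySem.List.pyRange 1 (labels.length : Int) 1).foldl
      (fun (st : List (Int × Int × String) × Int × String) (i : Int) =>
        if PySem.List.pyGetD labels i "" ≠ st.2.2 then
          (st.1 ++ [(st.2.1, i, st.2.2)], i, PySem.List.pyGetD labels i "")
        else st)
      ([], 0, PySem.List.pyGetD labels 0 "")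
    fin.1 ++ [(fin.2.1, (labels.length : Int), fin.2.2)]

-- ===== PORT B =====
def labels_to_intervals_alt (labels : List String) : List (Int × Int × String) :=
  if labels.length = 0 then []
  else
    let n : Int := labels.length
    let boundaries : List Int :=
      [0] ++ (PySem.List.pyRange 1 n 1).filter
        (fun i => PySem.List.pyGetD labels i "" ≠ PySem.List.pyGetD labels (i - 1) "") ++ [n]
    (boundaries.zip (boundaries.drop 1)).map
      (fun se => (se.1, se.2, PySem.List.pyGetD labels se.1 ""))

-- ===== PRECONDITION & SPEC =====
def Spec_labels_to_intervals (labels : List String) (out : List (Int × Int × String)) : Prop := out = labels_to_intervals_alt labels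
instance (labels : List String) (out : List (Int × Int × String)) : Decidable (Spec_labels_to_intervals labels out) := by unfold Spec_labels_to_intervals; infer_instance

-- ===== CLAIM (what is proved, stated in full; the proofs are below) =====
def Claim_equal_labels_to_intervals : Prop := ∀ (labels : List String), Dom_labels_to_intervals labels → Spec_labels_to_intervals labels (labels_to_intervals labels)

-- ===== LEMMAS AND PROOFS =====

/-- Proof-side interpretation of a boundary list: intervals from start `s` through the
change points `cs`, closing at `n`, each labelled by its start position. -/
def pvPairs (labels : List String) (n : Int) : Int → List Int → List (Int × Int × String)
  | s, [] => [(s, n, PySem.List.pyGetD labels s "")]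
  | s, c :: cs => (s, c, PySem.List.pyGetD labels s "") :: pvPairs labels n c cs

lemma zip_pairs (labels : List String) (n : Int) (cs : List Int) (s : Int) :
    ((s :: (cs ++ [n])).zip ((s :: (cs ++ [n])).drop 1)).map
      (fun se => (se.1, se.2, PySem.List.pyGetD labels se.1 "")) = pvPairs labels n s cs := by
  induction cs generalizing s with
  | nil => simp [pvPairs]
  | cons c cs ih => simpa [pvPairs] using ih c

lemma foldA_eq (labels : List String) (n : Int) :
    ∀ (m : Nat) (k : Int) (acc : List (Int × Int × String)) (s : Int) (cur : String),
      1 ≤ k → k ≤ n → m = (n - k).toNat →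
      cur = PySem.List.pyGetD labels (k - 1) "" →
      cur = PySem.List.pyGetD labels s "" →
      (let fin := (PySem.List.pyRange k n 1).foldl
        (fun (st : List (Int × Int × String) × Int × String) (i : Int) =>
          if PySem.List.pyGetD labels i "" ≠ st.2.2 then
            (st.1 ++ [(st.2.1, i, st.2.2)], i, PySem.List.pyGetD labels i "")
          else st) (acc, s, cur)
       fin.1 ++ [(fin.2.1, n, fin.2.2)]) =
      acc ++ pvPairs labels n s ((PySem.List.pyRange k n 1).filter
        (fun i => decide (PySem.List.pyGetD labels i "" ≠ PySem.List.pyGetD labels (i - 1) ""))) := by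
  intro m
  induction m with
  | zero =>
    intro k acc s cur h1 h2 hm hprev hstart
    have hk : k = n := by omega
    subst hk
    rw [PySem.List.pyRange_one_eq_nil (le_refl k)]
    simp [pvPairs, hstart]
  | succ m ih =>
    intro k acc s cur h1 h2 hm hprev hstart
    have hk : k < n := by omega
    rw [PySem.List.pyRange_one_cons hk]
    by_cases hc : PySem.List.pyGetD labels k "" = cur
    · have hfilt : ¬ (PySem.List.pyGetD labels k "" ≠ PySem.List.pyGetD labels (k - 1) "") := by
        rw [← hprev]; simpa using hc
      simp only [List.foldl_cons, List.filter_cons]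
      rw [if_neg (show ¬ (PySem.List.pyGetD labels k "" ≠ cur) from by simpa using hc),
        decide_eq_false hfilt]
      simp only [Bool.false_eq_true, if_false]
      exact ih (k + 1) acc s cur (by omega) (by omega) (by omega)
        (by simpa using hc.symm) hstart
    · have hfilt : PySem.List.pyGetD labels k "" ≠ PySem.List.pyGetD labels (k - 1) "" := by
        rw [← hprev]; exact hc
      simp only [List.foldl_cons, List.filter_cons]
      rw [if_pos hc, decide_eq_true hfilt]
      simp only [if_true]
      have := ih (k + 1) (acc ++ [(s, k, cur)]) k (PySem.List.pyGetD labels k "")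
        (by omega) (by omega) (by omega) (by simp) rfl
      simp only at this ⊢
      rw [this, hstart]
      simp [pvPairs]

-- ===== VERDICT (by name: the statement is the Claim_ definition above) =====
theorem labels_to_intervals_spec : Claim_equal_labels_to_intervals := by
  intro labels _
  unfold Spec_labels_to_intervals labels_to_intervals labels_to_intervals_alt
  by_cases h : labels.length = 0
  · simp [h]
  · simp only [if_neg h]
    have h1 : (1 : Int) ≤ labels.length := by
      have : 0 < labels.length := Nat.pos_of_ne_zero h
      exact_mod_cast this
    have := foldA_eq labels (labels.length : Int) ((labels.length : Int) - 1).toNat 1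
      [] 0 (PySem.List.pyGetD labels 0 "") (le_refl 1) h1 rfl (by norm_num) rfl
    simp only at this
    rw [this]
    simpa using
      (zip_pairs labels (labels.length : Int)
        ((PySem.List.pyRange 1 (labels.length : Int) 1).filter
          (fun i => decide (PySem.List.pyGetD labels i "" ≠ PySem.List.pyGetD labels (i - 1) ""))) 0).symm
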